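-- pv_equiv track=rewrite | github.com/SemakOV/code_examples | TenEasyFunc.py | matrixElementsSum
-- ===== SOURCE A (Python) =====
-- def matrixElementsSum(matrix):
--     zn = []
--     a = 0
--     for ind in range(len(matrix)):
--         for item in range(len(matrix[ind])):
--             if ind <= len(matrix) - 2:
--                 if matrix[ind][item] == 0:
--                     matrix[ind + 1][item] = 0
--             if matrix[ind][item] != 0:
--                 zn.append(matrix[ind][item])
--     for i in zn:
--         a += int(i)
--     return a
--
-- matrix = [
--     [0,1,1,2],
--     [0,5,0,0],
--     [2,0,3,3]
--         ]
--
-- a = [832, 998, 148, 570, 533, 561, 894, 147, 455, 279]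
-- ===== SOURCE B (Python) =====
-- def matrixElementsSum(matrix):
--     ncols = 0
--     for r in matrix:
--         if len(r) > ncols:
--             ncols = len(r)
--     total = 0
--     for col in range(ncols):
--         blocked = False
--         for r in matrix:
--             if col < len(r) and not blocked:
--                 if r[col] == 0:
--                     blocked = True
--                 else:
--                     total += r[col]
--     return total
-- ===== Notes on version B (the rewrite author's own statement) =====
-- stated objective: alternative
-- what changed: B traverses the matrix column-by-column carrying a per-column 'blocked' flag and accumulates the total directly, instead of A's row-by-row in-place zero-propagation into the next row followed by a second pass summing an intermediate list; B also does not mutate its argument.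
import Mathlib
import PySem

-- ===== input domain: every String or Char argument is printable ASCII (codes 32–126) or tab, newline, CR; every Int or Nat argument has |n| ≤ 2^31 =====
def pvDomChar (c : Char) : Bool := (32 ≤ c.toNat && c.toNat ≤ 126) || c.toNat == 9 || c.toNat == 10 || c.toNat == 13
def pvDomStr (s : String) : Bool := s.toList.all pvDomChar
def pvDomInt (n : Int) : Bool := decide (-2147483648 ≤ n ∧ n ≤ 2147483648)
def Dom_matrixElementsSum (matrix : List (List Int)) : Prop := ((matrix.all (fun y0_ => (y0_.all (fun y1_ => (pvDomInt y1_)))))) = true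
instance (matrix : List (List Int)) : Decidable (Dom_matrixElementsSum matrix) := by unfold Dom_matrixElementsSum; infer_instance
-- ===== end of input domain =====

-- B sums column-by-column with a per-column 'blocked' flag instead of A's in-place zero
-- propagation plus an intermediate list summed in a second pass; objective: alternative.
-- A mutates its argument in place (zeroes cells below zeros); B does not mutate — the
-- equivalence proved here is about the return value only.

-- ===== PORT A =====
def aInner (matrix : List (List Int)) (ind : Int)
    (st : List (List Int) × List Int) (item : Int) : List (List Int) × List Int :=
  let m' :=
    if ind ≤ (matrix.length : Int) - 2 ∧
        PySem.List.pyGetD (PySem.List.pyGetD st.1 ind []) item 0 = 0 then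
      PySem.List.pySetD st.1 (ind + 1)
        (PySem.List.pySetD (PySem.List.pyGetD st.1 (ind + 1) []) item 0)
    else st.1
  if PySem.List.pyGetD (PySem.List.pyGetD m' ind []) item 0 ≠ 0 then
    (m', st.2 ++ [PySem.List.pyGetD (PySem.List.pyGetD m' ind []) item 0])
  else (m', st.2)

def aOuter (matrix : List (List Int)) (st : List (List Int) × List Int) (ind : Int) :
    List (List Int) × List Int :=
  (PySem.List.pyRange 0 ((PySem.List.pyGetD st.1 ind []).length : Int) 1).foldl
    (aInner matrix ind) st

def matrixElementsSum (matrix : List (List Int)) : Int :=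
  let fin := (PySem.List.pyRange 0 (matrix.length : Int) 1).foldl (aOuter matrix)
    (matrix, ([] : List Int))
  fin.2.foldl (fun a i => a + i) 0

-- ===== PORT B =====
def bCol (col : Int) (st : Bool × Int) (r : List Int) : Bool × Int :=
  if col < (r.length : Int) ∧ st.1 = false then
    (if PySem.List.pyGetD r col 0 = 0 then (true, st.2)
     else (st.1, st.2 + PySem.List.pyGetD r col 0))
  else st

def matrixElementsSum_alt (matrix : List (List Int)) : Int :=
  let ncols : Nat := matrix.foldl (fun acc r => if r.length > acc then r.length else acc) 0
  (PySem.List.pyRange 0 (ncols : Int) 1).foldl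
    (fun total col => (matrix.foldl (bCol col) (false, total)).2) 0

-- ===== PRECONDITION & SPEC =====
-- Pre_ excludes exactly the inputs on which A raises IndexError: a (possibly propagated)
-- zero in column j of some row i whose successor row i+1 is too short for A's write
-- matrix[i+1][j] = 0.
def Pre_matrixElementsSum (matrix : List (List Int)) : Prop :=
  ∀ i < matrix.length, ∀ j < (matrix.getD i []).length,
    i + 1 < matrix.length →
    (∃ k ≤ i, j < (matrix.getD k []).length ∧ (matrix.getD k []).getD j 0 = 0) →
    j < (matrix.getD (i + 1) []).length

instance (matrix : List (List Int)) : Decidable (Pre_matrixElementsSum matrix) := by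
  unfold Pre_matrixElementsSum; infer_instance

def pvWitness_matrixElementsSum : List (List Int) := [[0, 1, 1, 2], [0, 5, 0, 0], [2, 0, 3, 3]]

def Spec_matrixElementsSum (matrix : List (List Int)) (out : Int) : Prop := out = matrixElementsSum_alt matrix
instance (matrix : List (List Int)) (out : Int) : Decidable (Spec_matrixElementsSum matrix out) := by unfold Spec_matrixElementsSum; infer_instance

-- ===== CLAIM (what is proved, stated in full; the proofs are below) =====
def Claim_equal_matrixElementsSum : Prop := ∀ (matrix : List (List Int)), Dom_matrixElementsSum matrix → Pre_matrixElementsSum matrix → Spec_matrixElementsSum matrix (matrixElementsSum matrix)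

-- ===== LEMMAS AND PROOFS =====

-- Row length / cell value of the ORIGINAL matrix, and "column j has a zero at or above row i".
def rLen (M : List (List Int)) (i : ℕ) : ℕ := (M.getD i []).length
def vAt (M : List (List Int)) (i j : ℕ) : Int := (M.getD i []).getD j 0
def zAb (M : List (List Int)) (i j : ℕ) : Bool :=
  (List.range (i + 1)).any (fun k => decide (j < rLen M k) && decide (vAt M k j = 0))
-- What cell (i,j) contributes to the total.
def contrib (M : List (List Int)) (i j : ℕ) : Int :=
  if zAb M i j then 0 else vAt M i j
def rowSum (M : List (List Int)) (i : ℕ) : Int :=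
  ((List.range (rLen M i)).map (fun j => contrib M i j)).sum
def specSum (M : List (List Int)) : Int :=
  ((List.range M.length).map (fun i => rowSum M i)).sum
-- Column-recursive view of the sum (B's traversal order).
def colSum (col : ℕ) : List (List Int) → Int
  | [] => 0
  | r :: rest =>
    if col < r.length then
      (if r.getD col 0 = 0 then 0 else r.getD col 0 + colSum col rest)
    else colSum col rest

theorem zAb_iff (M : List (List Int)) (i j : ℕ) :
    zAb M i j = true ↔ ∃ k ≤ i, j < rLen M k ∧ vAt M k j = 0 := by
  unfold zAb
  simp [List.any_eq_true, List.mem_range]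

theorem zAb_mono (M : List (List Int)) {i i' j : ℕ} (h : i ≤ i') (hz : zAb M i j = true) :
    zAb M i' j = true := by
  rw [zAb_iff] at *
  obtain ⟨k, hk, h1, h2⟩ := hz
  exact ⟨k, le_trans hk h, h1, h2⟩

theorem zAb_succ_iff (M : List (List Int)) (i j : ℕ) :
    zAb M (i + 1) j = true ↔ (zAb M i j = true ∨ (j < rLen M (i+1) ∧ vAt M (i+1) j = 0)) := by
  rw [zAb_iff, zAb_iff]
  constructor
  · rintro ⟨k, hk, h1, h2⟩
    rcases Nat.lt_or_ge k (i+1) with h | h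
    · exact Or.inl ⟨k, Nat.lt_succ_iff.mp h, h1, h2⟩
    · have : k = i + 1 := le_antisymm hk h
      subst this; exact Or.inr ⟨h1, h2⟩
  · rintro (⟨k, hk, h1, h2⟩ | ⟨h1, h2⟩)
    · exact ⟨k, Nat.le_succ_of_le hk, h1, h2⟩
    · exact ⟨i+1, le_refl _, h1, h2⟩

theorem zAb_zero_iff (M : List (List Int)) (j : ℕ) :
    zAb M 0 j = true ↔ (j < rLen M 0 ∧ vAt M 0 j = 0) := by
  rw [zAb_iff]
  constructor
  · rintro ⟨k, hk, h⟩; interval_cases k; exact h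
  · intro h; exact ⟨0, le_refl _, h⟩

theorem contrib_eq_effv (M : List (List Int)) (i j : ℕ) (hj : j < rLen M i) :
    contrib M i j = if 1 ≤ i ∧ zAb M (i - 1) j = true then 0 else vAt M i j := by
  unfold contrib
  by_cases h1 : 1 ≤ i ∧ zAb M (i - 1) j = true
  · have : zAb M i j = true := zAb_mono M (Nat.sub_le i 1) h1.2
    simp [this, h1]
  · simp only [if_neg h1]
    by_cases hz : zAb M i j = true
    · -- then vAt M i j = 0
      rcases Nat.eq_zero_or_pos i with h0 | hpos
      · subst h0; rw [zAb_zero_iff] at hz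
        simp [hz.2]
      · have hi1 : i - 1 + 1 = i := Nat.succ_pred_eq_of_pos hpos
        have := (zAb_succ_iff M (i-1) j)
        rw [hi1] at this
        rcases this.mp hz with h | h
        · exact absurd ⟨hpos, h⟩ h1
        · simp [hz, h.2]
    · simp [hz]

theorem pre_colLen (M : List (List Int)) (hP : Pre_matrixElementsSum M) :
    ∀ i, i < M.length → ∀ j, zAb M i j = true → j < rLen M i := by
  intro i
  induction i with
  | zero => intro _ j hz; exact (zAb_zero_iff M j |>.mp hz).1
  | succ i ih =>
    intro hi j hz
    rcases (zAb_succ_iff M i j).mp hz with h | h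
    · have hji : j < rLen M i := ih (Nat.lt_of_succ_lt hi) j h
      exact hP i (Nat.lt_of_succ_lt hi) j hji hi ((zAb_iff M i j).mp h)
    · exact h.1

theorem contrib_eq_zero_iff (M : List (List Int)) (i j : ℕ) (hj : j < rLen M i) :
    contrib M i j = 0 ↔ zAb M i j = true := by
  unfold contrib
  rcases Bool.eq_false_or_eq_true (zAb M i j) with hb | hb
  · simp [hb]
  · rw [hb]
    simp only [Bool.false_eq_true, if_false, iff_false]
    intro h0
    have : zAb M i j = true := (zAb_iff M i j).mpr ⟨i, le_refl _, hj, h0⟩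
    rw [this] at hb; cases hb

def okM (M : List (List Int)) (i : ℕ) (m : List (List Int)) : Prop :=
  m.length = M.length ∧
  (∀ r, (m.getD r []).length = rLen M r) ∧
  (∀ r j, r < M.length → j < rLen M r →
    (m.getD r []).getD j 0 =
      if 1 ≤ r ∧ r ≤ i ∧ zAb M (r - 1) j = true then 0 else vAt M r j)
def okMJ (M : List (List Int)) (i j : ℕ) (m : List (List Int)) : Prop :=
  m.length = M.length ∧
  (∀ r, (m.getD r []).length = rLen M r) ∧
  (∀ r c, r < M.length → c < rLen M r →
    (m.getD r []).getD c 0 =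
      if (1 ≤ r ∧ r ≤ i ∧ zAb M (r - 1) c = true) ∨
         (r = i + 1 ∧ r < M.length ∧ c < j ∧ zAb M i c = true) then 0
      else vAt M r c)

theorem inner_inv (M : List (List Int)) (hP : Pre_matrixElementsSum M) (i : ℕ)
    (hi : i < M.length) :
    ∀ j, j ≤ rLen M i → ∀ m zn, okM M i m →
      okMJ M i j ((List.range j).foldl (fun (st : List (List Int) × List Int) (jj : ℕ) => aInner M (↑i) st (↑jj)) (m, zn)).1 ∧
      ((List.range j).foldl (fun (st : List (List Int) × List Int) (jj : ℕ) => aInner M (↑i) st (↑jj)) (m, zn)).2.sum =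
        zn.sum + ((List.range j).map (fun c => contrib M i c)).sum := by
  intro j
  induction j with
  | zero =>
    intro _ m zn hok
    simp only [List.range_zero, List.foldl_nil]
    refine ⟨⟨hok.1, hok.2.1, ?_⟩, by simp⟩
    intro r c hr hc
    rw [hok.2.2 r c hr hc]
    apply if_congr _ rfl rfl
    constructor
    · intro h; exact Or.inl h
    · rintro (h | h)
      · exact h
      · omega
  | succ j ih =>
    intro hj m zn hok
    have hj' : j < rLen M i := Nat.lt_of_succ_le hj
    obtain ⟨hm, hs⟩ := ih (le_of_lt hj') m zn hok
    set P := (List.range j).foldl (fun (st : List (List Int) × List Int) (jj : ℕ) => aInner M (↑i) st (↑jj)) (m, zn) with hP_def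
    rw [List.range_succ, List.foldl_append, List.foldl_cons, List.foldl_nil]
    obtain ⟨hlen, hrow, hval⟩ := hm
    -- the value read at (i, j)
    have hvread : (P.1.getD i []).getD j 0 = contrib M i j := by
      rw [hval i j hi hj', contrib_eq_effv M i j hj']
      apply if_congr _ rfl rfl
      constructor
      · rintro (⟨h1, _, h3⟩ | ⟨h1, _⟩)
        · exact ⟨h1, h3⟩
        · omega
      · rintro ⟨h1, h3⟩; exact Or.inl ⟨h1, le_refl _, h3⟩
    have hguard : ((i : Int) ≤ (M.length : Int) - 2) ↔ i + 1 < M.length := by omega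
    -- normalize the pyGetD's in aInner
    have gD : ∀ (l : List (List Int)) (k : ℕ), PySem.List.pyGetD l (↑k) [] = l.getD k [] :=
      fun l k => PySem.List.pyGetD_natCast l k []
    have gDi : ∀ (l : List Int) (k : ℕ), PySem.List.pyGetD l (↑k) 0 = l.getD k 0 :=
      fun l k => PySem.List.pyGetD_natCast l k 0
    have hcast : ((i : Int) + 1) = ((i + 1 : ℕ) : Int) := by push_cast; ring
    by_cases hw : ((i : Int) ≤ (M.length : Int) - 2) ∧ (P.1.getD i []).getD j 0 = 0
    · -- write case
      have hin : i + 1 < M.length := hguard.mp hw.1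
      have hz : zAb M i j = true := (contrib_eq_zero_iff M i j hj').mp (hvread ▸ hw.2)
      have hjlen1 : j < rLen M (i + 1) :=
        hP i hi j hj' hin ((zAb_iff M i j).mp hz)
      have hrowlen : j < (P.1.getD (i+1) []).length := by rw [hrow (i+1)]; exact hjlen1
      have hi1len : i + 1 < P.1.length := by rw [hlen]; exact hin
      -- the new matrix
      set row' := PySem.List.pySetD (P.1.getD (i+1) []) (↑j) 0 with hrow'
      have hget2 : ∀ (r : ℕ), (PySem.List.pySetD P.1 (↑(i+1)) row').getD r [] =
          if r = i + 1 then row' else P.1.getD r [] := by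
        intro r
        have := PySem.List.pyGetD_pySetD_natCast P.1 (i+1) r row' [] hi1len
        rw [gD, gD] at this
        exact this
      have hrowlen' : row'.length = rLen M (i+1) := by
        rw [hrow', PySem.List.length_pySetD, hrow (i+1)]
      have hrowval : ∀ c : ℕ, row'.getD c 0 =
          if c = j then 0 else (P.1.getD (i+1) []).getD c 0 := by
        intro c
        have := PySem.List.pyGetD_pySetD_natCast (P.1.getD (i+1) []) j c 0 0 hrowlen
        rw [gDi, gDi] at this
        exact this
      have haInner : aInner M ↑i P ↑j =
          (PySem.List.pySetD P.1 (↑(i+1)) row', P.2) := by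
        unfold aInner
        simp only [hcast, gD, gDi]
        rw [if_pos hw, ← hrow']
        rw [hget2 i, if_neg (by omega : ¬ i = i + 1)]
        rw [if_neg (by simpa using hw.2)]
      rw [haInner]
      refine ⟨⟨?_, ?_, ?_⟩, ?_⟩
      · rw [PySem.List.length_pySetD]; exact hlen
      · intro r
        rw [hget2 r]
        split_ifs with h
        · subst h; exact hrowlen'
        · exact hrow r
      · intro r c hr hc
        rw [hget2 r]
        by_cases hreq : r = i + 1
        · subst hreq
          rw [if_pos rfl, hrowval c]
          by_cases hcj : c = j
          · rw [if_pos hcj, if_pos]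
            exact Or.inr ⟨rfl, hr, by omega, by rwa [hcj]⟩
          · rw [if_neg hcj, hval (i+1) c hr hc]
            apply if_congr _ rfl rfl
            constructor
            · rintro (h | ⟨h1, h2, h3, h4⟩)
              · exact Or.inl h
              · exact Or.inr ⟨h1, h2, by omega, h4⟩
            · rintro (h | ⟨h1, h2, h3, h4⟩)
              · exact Or.inl h
              · exact Or.inr ⟨h1, h2, by omega, h4⟩
        · rw [if_neg hreq, hval r c hr hc]
          apply if_congr _ rfl rfl
          constructor
          · rintro (h | ⟨h1, h2, h3, h4⟩)
            · exact Or.inl h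
            · exact Or.inr ⟨h1, h2, by omega, h4⟩
          · rintro (h | ⟨h1, h2, h3, h4⟩)
            · exact Or.inl h
            · exact absurd h1 hreq
      · simp only [List.range_succ, List.map_append, List.sum_append, List.map_cons,
          List.sum_cons, List.map_nil, List.sum_nil]
        rw [hs]
        have : contrib M i j = 0 := (contrib_eq_zero_iff M i j hj').mpr hz
        rw [this]; ring
    · -- no-write case
      have haInner : aInner M ↑i P ↑j =
          (P.1, if contrib M i j ≠ 0 then P.2 ++ [contrib M i j] else P.2) := by
        unfold aInner
        simp only [hcast, gD, gDi]
        rw [if_neg hw, hvread]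
        split_ifs <;> rfl
      rw [haInner]
      have hnz : ¬ (i + 1 < M.length ∧ zAb M i j = true) := by
        intro ⟨h1, h2⟩
        apply hw
        refine ⟨hguard.mpr h1, ?_⟩
        rw [hvread]
        exact (contrib_eq_zero_iff M i j hj').mpr h2
      refine ⟨⟨hlen, hrow, ?_⟩, ?_⟩
      · intro r c hr hc
        rw [hval r c hr hc]
        apply if_congr _ rfl rfl
        constructor
        · rintro (h | ⟨h1, h2, h3, h4⟩)
          · exact Or.inl h
          · exact Or.inr ⟨h1, h2, by omega, h4⟩
        · rintro (h | ⟨h1, h2, h3, h4⟩)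
          · exact Or.inl h
          · by_cases hcj : c = j
            · subst h1
              exact absurd ⟨h2, by rwa [hcj] at h4⟩ hnz
            · exact Or.inr ⟨h1, h2, by omega, h4⟩
      · simp only [List.range_succ, List.map_append, List.sum_append, List.map_cons,
          List.sum_cons, List.map_nil, List.sum_nil]
        split_ifs with h
        · rw [List.sum_append, hs, add_assoc]; simp
        · rw [hs, not_not.mp h]; ring

theorem outer_inv (M : List (List Int)) (hP : Pre_matrixElementsSum M) :
    ∀ i, i ≤ M.length →
      okM M i ((List.range i).foldl (fun (st : List (List Int) × List Int) (k : ℕ) => aOuter M st ↑k) (M, ([] : List Int))).1 ∧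
      ((List.range i).foldl (fun (st : List (List Int) × List Int) (k : ℕ) => aOuter M st ↑k) (M, ([] : List Int))).2.sum =
        ((List.range i).map (fun r => rowSum M r)).sum := by
  intro i
  induction i with
  | zero =>
    intro _
    simp only [List.range_zero, List.foldl_nil, List.map_nil, List.sum_nil]
    refine ⟨⟨rfl, fun r => rfl, ?_⟩, by trivial⟩
    intro r j hr hj
    rw [if_neg (by rintro ⟨h1, h2, _⟩; omega)]
    rfl
  | succ i ih =>
    intro hi1
    have hi : i < M.length := hi1
    obtain ⟨hok, hsum⟩ := ih (le_of_lt hi)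
    rw [List.range_succ, List.foldl_append, List.foldl_cons, List.foldl_nil]
    set P := (List.range i).foldl (fun (st : List (List Int) × List Int) (k : ℕ) => aOuter M st ↑k) (M, ([] : List Int)) with hPd
    have hbound : (PySem.List.pyGetD P.1 ↑i []).length = rLen M i := by
      rw [PySem.List.pyGetD_natCast]; exact hok.2.1 i
    have hout : aOuter M P ↑i =
        (List.range (rLen M i)).foldl (fun (st : List (List Int) × List Int) (jj : ℕ) => aInner M (↑i) st (↑jj)) (P.1, P.2) := by
      unfold aOuter
      rw [hbound, PySem.List.pyRange_zero_nat, List.foldl_map]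
    obtain ⟨hok', hsum'⟩ := inner_inv M hP i hi (rLen M i) (le_refl _) P.1 P.2 hok
    constructor
    · rw [hout]
      refine ⟨hok'.1, hok'.2.1, ?_⟩
      intro r j hr hj
      rw [hok'.2.2 r j hr hj]
      apply if_congr _ rfl rfl
      constructor
      · rintro (⟨h1, h2, h3⟩ | ⟨h1, h2, h3, h4⟩)
        · exact ⟨h1, by omega, h3⟩
        · subst h1
          exact ⟨by omega, le_refl _, by simpa using h4⟩
      · rintro ⟨h1, h2, h3⟩
        by_cases hr2 : r ≤ i
        · exact Or.inl ⟨h1, hr2, h3⟩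
        · have hreq : r = i + 1 := by omega
          subst hreq
          have h4 : zAb M i j = true := by simpa using h3
          exact Or.inr ⟨rfl, hr, pre_colLen M hP i hi j h4, h4⟩
    · rw [hout, hsum', hsum]
      simp [rowSum]

theorem A_eq_specSum (M : List (List Int)) (hP : Pre_matrixElementsSum M) :
    matrixElementsSum M = specSum M := by
  unfold matrixElementsSum
  dsimp only
  rw [PySem.List.pyRange_zero_nat, List.foldl_map]
  have h := (outer_inv M hP M.length (le_refl _)).2
  rw [PySem.List.foldl_add _ (fun x : Int => x) 0]
  simp only [List.map_id_fun', List.map_id', zero_add]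
  rw [show (List.foldl (fun (x : List (List Int) × List Int) (y : ℕ) => aOuter M x ↑y) (M, []) (List.range M.length)).2.sum = _ from h]
  rfl

theorem foldB_true (M : List (List Int)) (col : Int) (t : Int) :
    M.foldl (bCol col) (true, t) = (true, t) := by
  induction M with
  | nil => rfl
  | cons r rest ih => simpa [bCol] using ih

theorem foldB_false (M : List (List Int)) (col : ℕ) (t : Int) :
    (M.foldl (bCol ↑col) (false, t)).2 = t + colSum col M := by
  induction M generalizing t with
  | nil => simp [colSum]
  | cons r rest ih =>
    by_cases hc : col < r.length
    · by_cases hz : r.getD col 0 = 0 <;>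
        rw [List.getD_eq_getElem r 0 hc] at hz
      · simp [bCol, hc, hz, colSum, foldB_true]
      · simp [bCol, hc, hz, colSum, ih, add_assoc]
    · simp [bCol, hc, colSum, ih]

theorem colSum_eq (col : ℕ) (M : List (List Int)) :
    colSum col M =
      ((List.range M.length).map
        (fun i => if col < rLen M i then contrib M i col else 0)).sum := by
  induction M with
  | nil => simp [colSum]
  | cons r rest ih =>
    have hv : ∀ i : ℕ, vAt (r :: rest) (i + 1) col = vAt rest i col := fun i => rfl
    have hz1 : ∀ i : ℕ, zAb (r :: rest) (i+1) col = true ↔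
        ((col < r.length ∧ r.getD col 0 = 0) ∨ zAb rest i col = true) := by
      intro i
      rw [zAb_iff, zAb_iff]
      constructor
      · rintro ⟨k, hk, h1, h2⟩
        cases k with
        | zero => exact Or.inl ⟨h1, h2⟩
        | succ k' => exact Or.inr ⟨k', Nat.succ_le_succ_iff.mp hk, h1, h2⟩
      · rintro (⟨h1, h2⟩ | ⟨k, hk, h1, h2⟩)
        · exact ⟨0, Nat.zero_le _, h1, h2⟩
        · exact ⟨k+1, Nat.succ_le_succ hk, h1, h2⟩
    have hcontrib : ∀ i : ℕ, contrib (r :: rest) (i+1) col =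
        if col < r.length ∧ r.getD col 0 = 0 then 0 else contrib rest i col := by
      intro i
      unfold contrib
      by_cases h : col < r.length ∧ r.getD col 0 = 0
      · have hzt : zAb (r::rest) (i+1) col = true := (hz1 i).mpr (Or.inl h)
        rw [hzt, if_pos h]
        simp
      · have heq : zAb (r::rest) (i+1) col = zAb rest i col := by
          rw [Bool.eq_iff_iff, hz1 i]
          constructor
          · rintro (hh | hh)
            · exact absurd hh h
            · exact hh
          · exact Or.inr
        rw [heq, if_neg h, hv i]
    rw [List.length_cons, List.range_succ_eq_map, List.map_cons, List.sum_cons, List.map_map]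
    have hterm : ∀ i ∈ List.range rest.length,
        ((fun i => if col < rLen (r::rest) i then contrib (r::rest) i col else 0) ∘ Nat.succ) i
        = (fun i => if col < r.length ∧ r.getD col 0 = 0 then 0
             else (if col < rLen rest i then contrib rest i col else 0)) i := by
      intro i _
      simp only [Function.comp_apply, Nat.succ_eq_add_one]
      have hr : rLen (r::rest) (i + 1) = rLen rest i := rfl
      rw [hr, hcontrib i]
      split_ifs <;> rfl
    rw [List.map_congr_left hterm]
    have hr0 : rLen (r::rest) 0 = r.length := rfl
    have hv0 : vAt (r::rest) 0 col = r.getD col 0 := rfl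
    by_cases hc : col < r.length
    · by_cases hzz : r.getD col 0 = 0
      · have h0 : zAb (r::rest) 0 col = true := (zAb_zero_iff _ _).mpr ⟨by rwa [hr0], by rwa [hv0]⟩
        have hhead : contrib (r::rest) 0 col = 0 := by unfold contrib; rw [h0]; simp
        rw [if_pos (by rwa [hr0] : col < rLen (r::rest) 0), hhead]
        have : (List.map (fun i => if col < r.length ∧ r.getD col 0 = 0 then 0
             else (if col < rLen rest i then contrib rest i col else 0)) (List.range rest.length))
             = List.map (fun _ => (0:Int)) (List.range rest.length) := by
          apply List.map_congr_left
          intro i _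
          rw [if_pos ⟨hc, hzz⟩]
        rw [this]
        have hzz' : r[col] = 0 := by rw [List.getD_eq_getElem r 0 hc] at hzz; exact hzz
        simp [colSum, hc, hzz']
      · have h0 : zAb (r::rest) 0 col = false := by
          rcases Bool.eq_false_or_eq_true (zAb (r::rest) 0 col) with hb | hb
          · exact absurd (by rw [← hv0]; exact ((zAb_zero_iff _ _).mp hb).2) hzz
          · exact hb
        have hhead : contrib (r::rest) 0 col = r.getD col 0 := by
          unfold contrib; rw [h0, hv0]; simp
        rw [if_pos (by rwa [hr0] : col < rLen (r::rest) 0), hhead]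
        have : (List.map (fun i => if col < r.length ∧ r.getD col 0 = 0 then 0
             else (if col < rLen rest i then contrib rest i col else 0)) (List.range rest.length))
             = List.map (fun i => if col < rLen rest i then contrib rest i col else 0) (List.range rest.length) := by
          apply List.map_congr_left
          intro i _
          rw [if_neg (by rintro ⟨_, h⟩; exact hzz h)]
        rw [this, ← ih]
        have hzz' : ¬ r[col] = 0 := by rw [List.getD_eq_getElem r 0 hc] at hzz; exact hzz
        have hgz : r.getD col 0 = r[col] := List.getD_eq_getElem r 0 hc
        rw [hgz]
        simp [colSum, hc, hzz']
    · have h0f : ¬ col < rLen (r::rest) 0 := by rwa [hr0]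
      rw [if_neg h0f]
      have : (List.map (fun i => if col < r.length ∧ r.getD col 0 = 0 then 0
           else (if col < rLen rest i then contrib rest i col else 0)) (List.range rest.length))
           = List.map (fun i => if col < rLen rest i then contrib rest i col else 0) (List.range rest.length) := by
        apply List.map_congr_left
        intro i _
        rw [if_neg (by rintro ⟨h, _⟩; exact hc h)]
      rw [this, ← ih]
      simp [colSum, hc]

theorem rLen_le_ncols (M : List (List Int)) (i : ℕ) (hi : i < M.length) :
    rLen M i ≤ M.foldl (fun acc r => if r.length > acc then r.length else acc) 0 := by
  have key : ∀ (L : List (List Int)) (a : ℕ) (r : List Int), r ∈ L →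
      r.length ≤ L.foldl (fun acc r => if r.length > acc then r.length else acc) a := by
    intro L
    induction L with
    | nil => intro a r h; cases h
    | cons x xs ih =>
      intro a r h
      rcases List.mem_cons.mp h with rfl | h
      · -- r = x : fold result ≥ new acc which ≥ r.length
        have mono : ∀ (ys : List (List Int)) (a : ℕ),
            a ≤ ys.foldl (fun acc r => if r.length > acc then r.length else acc) a := by
          intro ys
          induction ys with
          | nil => intro a; simp
          | cons y ys ih2 =>
            intro a
            simp only [List.foldl_cons]
            by_cases h : y.length > a
            · rw [if_pos h]; exact le_trans (le_of_lt h) (ih2 _)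
            · rw [if_neg h]; exact ih2 _
        simp only [List.foldl_cons]
        refine le_trans ?_ (mono xs _)
        by_cases hgt : r.length > a
        · rw [if_pos hgt]
        · rw [if_neg hgt]; omega
      · exact ih _ r h
  have hmem : M.getD i [] ∈ M := by
    rw [List.getD_eq_getElem M [] hi]
    exact List.getElem_mem hi
  exact key M 0 _ hmem

theorem B_eq_specSum (M : List (List Int)) : matrixElementsSum_alt M = specSum M := by
  unfold matrixElementsSum_alt
  dsimp only
  rw [PySem.List.pyRange_zero_nat, List.foldl_map]
  set nc := M.foldl (fun acc r => if r.length > acc then r.length else acc) 0 with hnc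
  have h1 : ∀ (t : Int), (List.range nc).foldl
      (fun (total : Int) (k : ℕ) => (M.foldl (bCol ↑k) (false, total)).2) t
      = (List.range nc).foldl (fun (total : Int) (k : ℕ) => total + colSum k M) t := by
    intro t
    apply PySem.List.foldl_congr_mem
    intro acc x _
    exact foldB_false M x acc
  rw [h1, PySem.List.foldl_add, zero_add]
  have h2 : ((List.range nc).map (fun k => colSum k M)).sum
      = ∑ col ∈ Finset.range nc, ∑ i ∈ Finset.range M.length,
          (if col < rLen M i then contrib M i col else 0) := by
    have : ∀ col ∈ List.range nc, colSum col M =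
        (fun col => ∑ i ∈ Finset.range M.length,
          (if col < rLen M i then contrib M i col else 0)) col := by
      intro col _
      rw [colSum_eq]
      rfl
    rw [List.map_congr_left this]
    rfl
  rw [h2, Finset.sum_comm]
  unfold specSum rowSum
  have h3 : ∀ i ∈ Finset.range M.length,
      (∑ col ∈ Finset.range nc, (if col < rLen M i then contrib M i col else 0))
      = ((List.range (rLen M i)).map (fun j => contrib M i j)).sum := by
    intro i hi
    have hsub : Finset.range (rLen M i) ⊆ Finset.range nc := by
      intro x hx
      exact Finset.mem_range.mpr
        (lt_of_lt_of_le (Finset.mem_range.mp hx) (rLen_le_ncols M i (Finset.mem_range.mp hi)))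
    rw [← Finset.sum_subset hsub (by
      intro x _ hx
      rw [if_neg (by simpa using hx)])]
    have : ∀ col ∈ Finset.range (rLen M i),
        (if col < rLen M i then contrib M i col else 0) = contrib M i col := by
      intro col hcol
      rw [if_pos (Finset.mem_range.mp hcol)]
    rw [Finset.sum_congr rfl this]
    rfl
  rw [Finset.sum_congr rfl h3]
  rfl

-- ===== VERDICT (by name: the statement is the Claim_ definition above) =====
theorem matrixElementsSum_spec : Claim_equal_matrixElementsSum := by
  intro M _ hP
  unfold Spec_matrixElementsSum
  rw [A_eq_specSum M hP, B_eq_specSum M]
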